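-- pv_equiv track=rewrite | github.com/doakey3/Subsimport | import_subtitle.py | findEvenSplit
-- ===== SOURCE A (Python) =====
-- def findEvenSplit(word_list):
--     """
--     Given a list of words, attempts to split the word list
--     into 2 evenly sized strings
--     """
--     differences = []
--     for i in range(len(word_list)):
--         group1 = ' '.join(word_list[0:i+1])
--         group2 = ' '.join(word_list[i+1::])
--         differences.append(abs(len(group1) - len(group2)))
--     index = differences.index(min(differences))
--     for i in range(len(word_list)):
--         if i == index:
--             group1 = ' '.join(word_list[0:i+1])
--             group2 = ' '.join(word_list[i+1::])
--     return group1, group2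
-- ===== SOURCE B (Python) =====
-- def findEvenSplit(word_list):
--     """
--     Given a list of words, attempts to split the word list
--     into 2 evenly sized strings
--     """
--     n = len(word_list)
--     total = sum(len(w) for w in word_list)
--     best = None
--     best_i = 0
--     prefix = 0
--     for i in range(n):
--         prefix += len(word_list[i])
--         g1 = prefix + i
--         g2 = (total - prefix) + (n - i - 2) if i + 1 < n else 0
--         d = abs(g1 - g2)
--         if best is None or d < best:
--             best = d
--             best_i = i
--     return ' '.join(word_list[:best_i + 1]), ' '.join(word_list[best_i + 1:])
-- ===== Notes on version B (the rewrite author's own statement) =====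
-- stated objective: faster
-- what changed: A joins both halves of the list at every split point and then re-joins in a second scan; B makes one pass keeping a running prefix length, computes each split's length difference in O(1) from the prefix sum and the precomputed total, tracks the first strict minimum, and joins only once at the chosen index.
-- outside the precondition, e.g. on findEvenSplit([]): A raises ValueError, B returns ('', '')
-- crash fix: On the empty list A raises ValueError (min() of an empty sequence); B returns a pair of empty strings. — e.g. on findEvenSplit([]): A raises ValueError, B returns ("", "")
import Mathlib
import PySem

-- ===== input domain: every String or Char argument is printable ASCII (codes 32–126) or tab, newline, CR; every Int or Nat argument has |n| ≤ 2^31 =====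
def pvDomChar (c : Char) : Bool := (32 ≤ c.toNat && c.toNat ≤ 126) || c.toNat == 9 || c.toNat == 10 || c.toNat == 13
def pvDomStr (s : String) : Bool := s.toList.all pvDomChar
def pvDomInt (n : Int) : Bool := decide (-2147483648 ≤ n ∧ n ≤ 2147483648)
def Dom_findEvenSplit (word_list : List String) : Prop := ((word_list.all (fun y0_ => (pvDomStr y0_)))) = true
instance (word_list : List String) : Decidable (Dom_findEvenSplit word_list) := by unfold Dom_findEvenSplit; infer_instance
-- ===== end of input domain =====

-- B replaces A's quadratic "join both halves at every split point" by one pass over a running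
-- prefix length with a first-strict-min scan, joining only the chosen split (objective: faster).

-- ===== PORT A =====
-- loop body of A's first loop: abs(len(' '.join(word_list[0:i+1])) - len(' '.join(word_list[i+1::])))
def diffAt (ws : List String) (i : Int) : Int :=
  let group1 := PySem.Str.join " " (PySem.List.slice ws (some 0) (some (i + 1)))
  let group2 := PySem.Str.join " " (PySem.List.slice ws (some (i + 1)) none)
  |PySem.Str.len group1 - PySem.Str.len group2|

-- the pair (group1, group2) built at index i (A's second loop body)
def groupsAt (ws : List String) (i : Int) : String × String :=
  (PySem.Str.join " " (PySem.List.slice ws (some 0) (some (i + 1))),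
   PySem.Str.join " " (PySem.List.slice ws (some (i + 1)) none))

def findEvenSplit (word_list : List String) : String × String :=
  let n : Int := PySem.List.len word_list
  let differences : List Int :=
    (PySem.List.pyRange 0 n 1).foldl (fun acc i => acc ++ [diffAt word_list i]) []
  match PySem.List.min? differences (fun x => x) with
  | none => ("", "")  -- unreachable: min([]) raises ValueError, excluded by Pre_
  | some m =>
    let index : Nat := (PySem.List.index? differences m).getD 0
    (PySem.List.pyRange 0 n 1).foldl (fun st i =>
      if i = (index : Int) then groupsAt word_list i else st) ("", "")

-- ===== PORT B =====
-- 'if best is None or d < best: best = d; best_i = i' on a (best, best_i) pair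
def scanStep (st : Option Int × Int) (p : Int × Int) : Option Int × Int :=
  match st.1 with
  | none => (some p.2, p.1)
  | some b => if p.2 < b then (some p.2, p.1) else st

-- B's loop body: prefix += len(word_list[i]); g1, g2 from prefix sums; keep the first strict min
def stepB (n total : Int) (ws : List String) (st : Int × (Option Int × Int)) (i : Int) :
    Int × (Option Int × Int) :=
  let pfx := st.1 + PySem.Str.len (PySem.List.pyGetD ws i "")
  let g1 := pfx + i
  let g2 := if i + 1 < n then (total - pfx) + (n - i - 2) else 0
  (pfx, scanStep st.2 (i, |g1 - g2|))

def findEvenSplit_alt (word_list : List String) : String × String :=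
  let n : Int := PySem.List.len word_list
  let total : Int := (word_list.map PySem.Str.len).sum
  let r := (PySem.List.pyRange 0 n 1).foldl (stepB n total word_list) (0, (none, 0))
  let k := r.2.2
  (PySem.Str.join " " (PySem.List.slice word_list (some 0) (some (k + 1))),
   PySem.Str.join " " (PySem.List.slice word_list (some (k + 1)) none))

-- ===== PRECONDITION & SPEC =====
-- Pre_ excludes only the empty list, on which A raises ValueError (min of an empty sequence).
def Pre_findEvenSplit (word_list : List String) : Prop := word_list ≠ []
instance (word_list : List String) : Decidable (Pre_findEvenSplit word_list) := by
  unfold Pre_findEvenSplit; infer_instance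
def pvWitness_findEvenSplit : List String := ["ab", "c"]

-- On the empty list A raises ValueError (min of an empty sequence); B returns a pair of empty strings.
def Raises_findEvenSplit (word_list : List String) : Prop := word_list = []
instance (word_list : List String) : Decidable (Raises_findEvenSplit word_list) := by
  unfold Raises_findEvenSplit; infer_instance
def pvRaiseWitness_findEvenSplit : List String := []
def pvRaiseWitnessOut_findEvenSplit : String × String := ("", "")

def Spec_findEvenSplit (word_list : List String) (out : String × String) : Prop :=
  out = findEvenSplit_alt word_list
instance (word_list : List String) (out : String × String) : Decidable (Spec_findEvenSplit word_list out) := by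
  unfold Spec_findEvenSplit; infer_instance

-- ===== CLAIM (what is proved, stated in full; the proofs are below) =====
def Claim_equal_findEvenSplit : Prop := ∀ (word_list : List String), Dom_findEvenSplit word_list →
  Pre_findEvenSplit word_list → Spec_findEvenSplit word_list (findEvenSplit word_list)
def Claim_raises_findEvenSplit : Prop :=
  (∀ (word_list : List String), Dom_findEvenSplit word_list → Raises_findEvenSplit word_list →
      ¬ Pre_findEvenSplit word_list) ∧
  (Dom_findEvenSplit (pvRaiseWitness_findEvenSplit) ∧ Raises_findEvenSplit (pvRaiseWitness_findEvenSplit) ∧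
      findEvenSplit_alt (pvRaiseWitness_findEvenSplit) = pvRaiseWitnessOut_findEvenSplit)

-- ===== LEMMAS AND PROOFS =====

-- total of the words' lengths (Nat form, and the Int form the ports compute with)
def SLn (ws : List String) : Nat := (ws.map (fun w => w.toList.length)).sum
def SL (ws : List String) : Int := (SLn ws : Int)

-- the value B's loop computes at index k, in closed form
def dB (ws : List String) (k : Nat) : Int :=
  |(SL (ws.take (k + 1)) + k) -
    (if (k : Int) + 1 < (ws.length : Int) then
      (SL ws - SL (ws.take (k + 1))) + ((ws.length : Int) - k - 2)
    else 0)|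

-- ' '.join length on char lists: first word, then (len w + 1) per further word
lemma jlenc (t : List (List Char)) : ∀ (c : List Char),
    (PySem.Chars.join [' '] (c :: t)).length = c.length + ((t.map (fun w => w.length + 1)).sum) := by
  induction t with
  | nil => intro c; simp [PySem.Chars.join_singleton]
  | cons q rest ih =>
    intro c
    rw [PySem.Chars.join_cons_cons]
    simp only [List.length_append, ih q, List.map_cons, List.sum_cons, List.length_cons,
      List.length_nil]
    omega

lemma sum_len_int (ws : List String) : (ws.map PySem.Str.len).sum = SL ws := by
  unfold SL
  induction ws with
  | nil => simp [SLn]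
  | cons a as ih => simp [SLn, PySem.Str.len_eq] at *; omega

lemma jlen_ne (l : List String) (h : l ≠ []) :
    (PySem.Str.join " " l).toList.length + 1 = SLn l + l.length := by
  obtain ⟨x, t, rfl⟩ := List.exists_cons_of_ne_nil h
  rw [PySem.Str.toList_join]
  have hsep : " ".toList = [' '] := rfl
  rw [hsep, List.map_cons, jlenc]
  have hmap : ∀ (ts : List String), ((ts.map String.toList).map (fun w => w.length + 1)).sum
      = SLn ts + ts.length := by
    intro ts
    induction ts with
    | nil => simp [SLn]
    | cons a as ih2 => simp [SLn, List.map_cons] at *; omega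
  rw [hmap]
  simp [SLn]
  omega

lemma jlen_int (l : List String) (h : l ≠ []) :
    PySem.Str.len (PySem.Str.join " " l) = SL l + l.length - 1 := by
  have := jlen_ne l h
  rw [PySem.Str.len_eq, SL]
  have hl : 0 < l.length := List.length_pos_iff.mpr h
  omega

lemma SLn_take_drop (ws : List String) (k : Nat) : SLn (ws.take k) + SLn (ws.drop k) = SLn ws := by
  unfold SLn
  rw [← List.sum_append, ← List.map_append, List.take_append_drop]

lemma SLn_take_succ (ws : List String) (a : Nat) (h : a < ws.length) :
    SLn (ws.take (a + 1)) = SLn (ws.take a) + (ws.getD a "").toList.length := by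
  unfold SLn
  rw [List.map_take, List.map_take, List.take_succ]
  simp [List.getElem?_eq_getElem h, List.getD_eq_getElem?_getD, List.getElem?_eq_getElem h]

-- A's per-index difference equals B's closed form
lemma diffAt_eq_dB (ws : List String) (k : Nat) (hk : k < ws.length) :
    diffAt ws (k : Int) = dB ws k := by
  unfold diffAt dB
  simp only []
  rw [show (k : Int) + 1 = ((k + 1 : Nat) : Int) by push_cast; ring]
  rw [PySem.List.slice_zero_start, PySem.List.slice_to_natCast, PySem.List.slice_from_natCast]
  have htake_ne : ws.take (k + 1) ≠ [] := by
    intro h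
    have := congrArg List.length h
    rw [List.length_take, List.length_nil] at this
    omega
  have hlen_take : (ws.take (k + 1)).length = k + 1 := by rw [List.length_take]; omega
  rw [jlen_int _ htake_ne, hlen_take]
  by_cases hlt : k + 1 < ws.length
  · have hdrop_ne : ws.drop (k + 1) ≠ [] := by
      intro h
      have := congrArg List.length h
      simp at this
      omega
    rw [jlen_int _ hdrop_ne]
    have hcond : (((k + 1 : Nat) : Int) < (ws.length : Int)) := by exact_mod_cast hlt
    rw [if_pos hcond]
    congr 1
    have h1 := SLn_take_drop ws (k + 1)
    have h2 : (ws.drop (k + 1)).length = ws.length - (k + 1) := by simp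
    rw [h2]
    unfold SL
    push_cast
    omega
  · have hdrop : ws.drop (k + 1) = [] := by
      rw [List.drop_eq_nil_iff]; omega
    rw [hdrop]
    have hcond : ¬ (((k + 1 : Nat) : Int) < (ws.length : Int)) := by
      intro h; exact hlt (by exact_mod_cast h)
    rw [if_neg hcond]
    have hj : PySem.Str.len (PySem.Str.join " " ([] : List String)) = 0 := by decide
    rw [hj]
    congr 1
    push_cast
    ring

-- A's first loop builds exactly the list of dB-values
lemma A_differences (ws : List String) :
    (PySem.List.pyRange 0 (ws.length : Int) 1).foldl (fun acc i => acc ++ [diffAt ws i]) []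
      = (List.range ws.length).map (fun k => dB ws k) := by
  rw [PySem.List.foldl_append_singleton_eq_map, List.nil_append, PySem.List.pyRange_zero_nat,
    List.map_map]
  apply List.map_congr_left
  intro k hk
  simp only [Function.comp]
  exact diffAt_eq_dB ws k (List.mem_range.mp hk)

-- the first-strict-min scan, started on a known best, lands on the first overall minimum
lemma scan_some (rest : List Int) : ∀ (k b j : Int),
    (PySem.List.enumerate rest k).foldl scanStep (some b, j)
      = (some (rest.foldl min b),
         if ∃ x ∈ rest, x < b then
           k + (((PySem.List.index? rest (rest.foldl min b)).getD 0 : Nat) : Int)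
         else j) := by
  induction rest with
  | nil => intro k b j; simp [PySem.List.enumerate]
  | cons x t ih =>
    intro k b j
    rw [PySem.List.enumerate_cons, List.foldl_cons]
    by_cases hx : x < b
    · have hstep : scanStep (some b, j) (k, x) = (some x, k) := by
        simp [scanStep, hx]
      have hminbx : min b x = x := by omega
      rw [hstep, ih (k + 1) x k, List.foldl_cons, hminbx]
      by_cases hy : ∃ y ∈ t, y < x
      · rw [if_pos hy, if_pos ⟨x, by simp, hx⟩]
        have hm_lt : t.foldl min x < x := by
          obtain ⟨y, hy1, hy2⟩ := hy
          have := (PySem.List.foldl_min_le t x).2 y hy1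
          omega
        have hm_mem : t.foldl min x ∈ t := by
          rcases PySem.List.foldl_min_mem t x with h | h
          · omega
          · exact h
        rw [PySem.List.index?_cons_of_ne t (by omega)]
        obtain ⟨jt, hjt⟩ := Option.isSome_iff_exists.mp
          ((PySem.List.index?_isSome_iff t (t.foldl min x)).mpr hm_mem)
        rw [hjt]
        simp
        ring_nf
      · rw [if_neg hy, if_pos ⟨x, by simp, hx⟩]
        have hm_eq : t.foldl min x = x := by
          rcases PySem.List.foldl_min_mem t x with h | h
          · exact h
          · have h1 := (PySem.List.foldl_min_le t x).1
            have h2 : ¬ t.foldl min x < x := fun hc => hy ⟨_, h, hc⟩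
            omega
        rw [hm_eq, PySem.List.index?_cons_self]
        simp
    · have hstep : scanStep (some b, j) (k, x) = (some b, j) := by
        simp [scanStep, hx]
      have hminbx : min b x = b := by omega
      rw [hstep, ih (k + 1) b j, List.foldl_cons, hminbx]
      by_cases hy : ∃ y ∈ t, y < b
      · rw [if_pos hy, if_pos (by obtain ⟨y, h1, h2⟩ := hy; exact ⟨y, by simp [h1], h2⟩)]
        have hm_lt : t.foldl min b < b := by
          obtain ⟨y, hy1, hy2⟩ := hy
          have := (PySem.List.foldl_min_le t b).2 y hy1
          omega
        have hm_mem : t.foldl min b ∈ t := by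
          rcases PySem.List.foldl_min_mem t b with h | h
          · omega
          · exact h
        rw [PySem.List.index?_cons_of_ne t (by omega)]
        obtain ⟨jt, hjt⟩ := Option.isSome_iff_exists.mp
          ((PySem.List.index?_isSome_iff t (t.foldl min b)).mpr hm_mem)
        rw [hjt]
        simp
        ring_nf
      · rw [if_neg hy, if_neg ?_]
        · intro hc
          obtain ⟨y, hy1, hy2⟩ := hc
          rcases List.mem_cons.mp hy1 with rfl | hmem
          · exact hx hy2
          · exact hy ⟨y, hmem, hy2⟩

-- from a cold start the scan returns the minimum and Python's differences.index(min(differences))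
lemma scan_full (d : Int) (rest : List Int) :
    (PySem.List.enumerate (d :: rest) 0).foldl scanStep (none, 0)
      = (some (rest.foldl min d),
         (((PySem.List.index? (d :: rest) (rest.foldl min d)).getD 0 : Nat) : Int)) := by
  rw [PySem.List.enumerate_cons, List.foldl_cons]
  have hstep : scanStep (none, 0) ((0 : Int), d) = (some d, 0) := by simp [scanStep]
  rw [hstep, show (0 : Int) + 1 = 1 from rfl, scan_some rest 1 d 0]
  by_cases hy : ∃ y ∈ rest, y < d
  · rw [if_pos hy]
    have hm_lt : rest.foldl min d < d := by
      obtain ⟨y, hy1, hy2⟩ := hy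
      have := (PySem.List.foldl_min_le rest d).2 y hy1
      omega
    have hm_mem : rest.foldl min d ∈ rest := by
      rcases PySem.List.foldl_min_mem rest d with h | h
      · omega
      · exact h
    rw [PySem.List.index?_cons_of_ne rest (by omega)]
    obtain ⟨jt, hjt⟩ := Option.isSome_iff_exists.mp
      ((PySem.List.index?_isSome_iff rest (rest.foldl min d)).mpr hm_mem)
    rw [hjt]
    simp
    ring_nf
  · rw [if_neg hy]
    have hm_eq : rest.foldl min d = d := by
      rcases PySem.List.foldl_min_mem rest d with h | h
      · exact h
      · have h1 := (PySem.List.foldl_min_le rest d).1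
        have h2 : ¬ rest.foldl min d < d := fun hc => hy ⟨_, h, hc⟩
        omega
    rw [hm_eq, PySem.List.index?_cons_self]
    simp

-- B's loop, from split point a on, is the scan over the remaining dB-values
lemma B_fold (ws : List String) : ∀ (cnt a : Nat) (st : Option Int × Int),
    a + cnt = ws.length →
    (PySem.List.pyRange (a : Int) (ws.length : Int) 1).foldl
        (stepB (ws.length : Int) (SL ws) ws) (SL (ws.take a), st)
      = (SL ws,
         (PySem.List.enumerate ((List.range' a cnt).map (fun k => dB ws k)) (a : Int)).foldl
           scanStep st) := by
  intro cnt
  induction cnt with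
  | zero =>
    intro a st h
    rw [PySem.List.pyRange_one_eq_nil (by omega)]
    simp [List.take_of_length_le (by omega : ws.length ≤ a), PySem.List.enumerate_nil]
  | succ c ih =>
    intro a st h
    have ha : a < ws.length := by omega
    rw [PySem.List.pyRange_one_cons (by exact_mod_cast ha), List.foldl_cons]
    have hpfx : SL (ws.take a) + PySem.Str.len (PySem.List.pyGetD ws (a : Int) "")
        = SL (ws.take (a + 1)) := by
      rw [PySem.List.pyGetD_natCast, PySem.Str.len_eq]
      unfold SL
      rw [SLn_take_succ ws a ha]
      push_cast
      ring
    have hstep : stepB (ws.length : Int) (SL ws) ws (SL (ws.take a), st) (a : Int)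
        = (SL (ws.take (a + 1)), scanStep st ((a : Int), dB ws a)) := by
      unfold stepB dB
      simp only [hpfx]
    rw [hstep]
    rw [show (a : Int) + 1 = ((a + 1 : Nat) : Int) by push_cast; ring,
      ih (a + 1) (scanStep st ((a : Int), dB ws a)) (by omega)]
    rw [List.range'_succ, List.map_cons, PySem.List.enumerate_cons]
    rw [show (a : Int) + 1 = ((a + 1 : Nat) : Int) by push_cast; ring, List.foldl_cons]

-- A's second loop: exactly one index matches, so the fold returns the pair built there
lemma foldl_pick {α : Type} (F : Int → α) (n j : Int) (h0 : 0 ≤ j) (h : j < n) (init : α) :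
    (PySem.List.pyRange 0 n 1).foldl (fun st i => if i = j then F i else st) init = F j := by
  rw [PySem.List.pyRange_one_append 0 (j + 1) n (by omega) (by omega),
    PySem.List.pyRange_one_succ_right h0, List.foldl_append, List.foldl_append]
  have h1 : (PySem.List.pyRange 0 j 1).foldl (fun st i => if i = j then F i else st) init
      = init := by
    rw [PySem.List.foldl_congr_mem _ _ (fun acc _ => acc) init
      (fun acc x hx => by
        have := (PySem.List.mem_pyRange_one).mp hx
        rw [if_neg (by omega)]),
      PySem.List.foldl_ignore]
  rw [h1]
  simp only [List.foldl_cons, List.foldl_nil, if_true, eq_self_iff_true]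
  rw [PySem.List.foldl_congr_mem _ _ (fun acc _ => acc) (F j)
    (fun acc x hx => by
      have := (PySem.List.mem_pyRange_one).mp hx
      rw [if_neg (by omega)]),
    PySem.List.foldl_ignore]

-- ===== VERDICT (by name: the statement is the Claim_ definition above) =====
theorem findEvenSplit_spec : Claim_equal_findEvenSplit := by
  intro ws _ hpre
  unfold Spec_findEvenSplit
  have hL : 0 < ws.length := List.length_pos_iff.mpr hpre
  have hdvne : (List.range ws.length).map (fun k => dB ws k) ≠ [] := by
    simp only [ne_eq, List.map_eq_nil_iff, List.range_eq_nil]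
    omega
  obtain ⟨d, rest, hdv⟩ := List.exists_cons_of_ne_nil hdvne
  set m := rest.foldl min d with hm
  set iA : Nat := (PySem.List.index? (d :: rest) m).getD 0 with hiA
  have hiA_lt : iA < ws.length := by
    have hmem : m ∈ d :: rest := by
      rcases PySem.List.foldl_min_mem rest d with h | h
      · rw [hm, h]; exact List.mem_cons_self
      · exact List.mem_cons_of_mem d h
    obtain ⟨jt, hjt⟩ := Option.isSome_iff_exists.mp
      ((PySem.List.index?_isSome_iff (d :: rest) m).mpr hmem)
    obtain ⟨hk, -, -⟩ := PySem.List.getElem_of_index?_eq_some hjt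
    have hlen : (d :: rest).length = ws.length := by
      rw [← hdv]
      simp
    rw [hiA, hjt]
    simp only [Option.getD_some]
    omega
  have hA : findEvenSplit ws = groupsAt ws (iA : Int) := by
    unfold findEvenSplit
    simp only [PySem.List.len_eq, A_differences ws, hdv, PySem.List.min?_id_cons, ← hm, ← hiA]
    exact foldl_pick (groupsAt ws) (ws.length : Int) (iA : Int) (by omega)
      (by exact_mod_cast hiA_lt) _
  have hB : findEvenSplit_alt ws = groupsAt ws (iA : Int) := by
    unfold findEvenSplit_alt
    simp only [PySem.List.len_eq, sum_len_int]
    have hfold := B_fold ws ws.length 0 (none, 0) (by omega)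
    rw [List.take_zero] at hfold
    rw [show SL ([] : List String) = 0 from rfl] at hfold
    rw [show List.range' 0 ws.length = List.range ws.length from (List.range_eq_range').symm,
      hdv] at hfold
    rw [show ((0 : Nat) : Int) = (0 : Int) from rfl] at hfold
    rw [scan_full d rest, ← hm, ← hiA] at hfold
    rw [hfold]
    rfl
  rw [hA, hB]

@[simp]
theorem findEvenSplit_raises : Claim_raises_findEvenSplit := by
  unfold Claim_raises_findEvenSplit
  constructor
  · intro ws _ hr hp
    exact hp hr
  · exact ⟨by decide, by decide, by decide⟩
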